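-- pv_equiv track=rewrite | github.com/sushain97/apertium-monorepo-svn-82937 | staging/apertium-hbs_HR-hbs_SR/expand-to-dix.py | tagToSym
-- ===== SOURCE A (Python) =====
-- def tagToSym(s): #{
-- 	out = '';
-- 	for c in s: #{
-- 		if c == '<': #{
-- 			out = out + '<s n="';
-- 			continue;
-- 		#}
-- 		if c == '>': #{
-- 			out = out + '"/>';
-- 			#continue;
-- 			return out;
-- 		#}
-- 		out = out + c;
-- 	#}
-- 	return out;
-- ===== SOURCE B (Python) =====
-- def tagToSym(s):
--     idx = s.find('>')
--     if idx == -1: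
--         return s.replace('<', '<s n="')
--     return s[:idx].replace('<', '<s n="') + '"/>'
-- ===== Notes on version B (the rewrite author's own statement) =====
-- stated objective: faster
-- what changed: Replaced the character-by-character accumulator loop with a boundary-locate-then-bulk-transform shape: find the index of the first '>', slice the prefix, and expand every '<' with one str.replace.
import Mathlib
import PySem

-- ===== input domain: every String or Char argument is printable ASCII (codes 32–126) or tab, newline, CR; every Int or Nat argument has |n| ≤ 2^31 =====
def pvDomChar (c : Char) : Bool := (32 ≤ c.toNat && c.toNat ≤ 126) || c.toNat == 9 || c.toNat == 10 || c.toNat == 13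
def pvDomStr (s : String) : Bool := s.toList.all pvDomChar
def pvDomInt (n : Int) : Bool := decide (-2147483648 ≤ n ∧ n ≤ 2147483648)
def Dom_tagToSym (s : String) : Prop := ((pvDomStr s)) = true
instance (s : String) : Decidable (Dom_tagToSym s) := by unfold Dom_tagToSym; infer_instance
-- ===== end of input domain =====

-- B locates the first '>' with find, slices the prefix and expands every '<' with one bulk replace,
-- instead of A's per-character accumulator loop with an early return (objective: idiomatic).

-- ===== PORT A =====
-- A's loop over the characters, 'out' the accumulator; returns at the first '>'.
def tagToSymGo : List Char → List Char → List Char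
  | [], out => out
  | c :: rest, out =>
    if c = '<' then tagToSymGo rest (out ++ "<s n=\"".toList)
    else if c = '>' then out ++ "\"/>".toList
    else tagToSymGo rest (out ++ [c])

def tagToSym (s : String) : String := String.ofList (tagToSymGo s.toList [])

-- ===== PORT B =====
def tagToSym_alt (s : String) : String :=
  let idx := PySem.Str.find s ">"
  if idx = -1 then PySem.Str.replace s "<" "<s n=\""
  else PySem.Str.replace (PySem.Str.slice s none (some idx)) "<" "<s n=\"" ++ "\"/>"

-- ===== PRECONDITION & SPEC =====
def Spec_tagToSym (s : String) (out : String) : Prop := out = tagToSym_alt s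
instance (s : String) (out : String) : Decidable (Spec_tagToSym s out) := by unfold Spec_tagToSym; infer_instance

-- ===== CLAIM (what is proved, stated in full; the proofs are below) =====
def Claim_equal_tagToSym : Prop := ∀ (s : String), Dom_tagToSym s → Spec_tagToSym s (tagToSym s)

-- ===== LEMMAS AND PROOFS =====

-- expansion of every occurrence of the character a (a single-character str.replace), as a flatMap
def pvRep (a : Char) (r : List Char) (l : List Char) : List Char :=
  l.flatMap (fun c => if c = a then r else [c])

theorem replace_single (a : Char) (r : List Char) (l : List Char) :
    PySem.Chars.replace l [a] r = pvRep a r l := by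
  have go : ∀ (l acc : List Char),
      PySem.Chars.replace.go [a] r l.length l acc = acc.reverse ++ pvRep a r l := by
    intro l
    induction l with
    | nil => intro acc; simp [PySem.Chars.replace.go, pvRep]
    | cons c t ih =>
        intro acc
        simp only [List.length_cons, PySem.Chars.replace.go, List.isPrefixOf, List.drop_succ_cons]
        by_cases h : c = a
        · simp [h, ih, pvRep]
        · simp [h, (by simpa using (beq_eq_false_iff_ne (a:=a) (b:=c)).2 (Ne.symm h) : (a == c) = false),
            ih, pvRep]
  simp [PySem.Chars.replace, go]

theorem findGo_cons (a c : Char) (t : List Char) (k : Nat) :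
    PySem.Chars.find.go [a] (c :: t) k =
      if c = a then (k : Int) else PySem.Chars.find.go [a] t (k + 1) := by
  simp only [PySem.Chars.find.go, List.isPrefixOf]
  by_cases h : c = a
  · simp [h]
  · simp [h, (by simpa using (beq_eq_false_iff_ne (a:=a) (b:=c)).2 (Ne.symm h) : (a == c) = false)]

theorem findGo_shift (a : Char) :
    ∀ (t : List Char) (k : Nat),
      PySem.Chars.find.go [a] t k =
        if PySem.Chars.find.go [a] t 0 = -1 then -1
        else PySem.Chars.find.go [a] t 0 + k := by
  intro t
  induction t with
  | nil => intro k; simp [PySem.Chars.find.go]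
  | cons c t ih =>
      intro k
      rw [findGo_cons, findGo_cons]
      by_cases h : c = a
      · simp [h]
      · rw [if_neg h, if_neg h, ih (k+1), ih 1]
        have hge : -1 ≤ PySem.Chars.find.go [a] t 0 := by
          have := PySem.Chars.neg_one_le_find t [a]
          simpa [PySem.Chars.find] using this
        split_ifs with h1 h2 h3 <;> omega

theorem find_cons_single (a c : Char) (t : List Char) :
    PySem.Chars.find (c :: t) [a] =
      if c = a then 0 else
        (if PySem.Chars.find t [a] = -1 then -1 else PySem.Chars.find t [a] + 1) := by
  simp only [PySem.Chars.find]
  rw [findGo_cons]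
  by_cases h : c = a
  · simp [h]
  · rw [if_neg h, if_neg h, findGo_shift]
    norm_num

-- the list-level value of B
def pvAltList (l : List Char) : List Char :=
  if PySem.Chars.find l ['>'] = -1 then pvRep '<' "<s n=\"".toList l
  else pvRep '<' "<s n=\"".toList (l.take (PySem.Chars.find l ['>']).toNat) ++ "\"/>".toList

theorem tagToSymGo_eq (l : List Char) : ∀ (acc : List Char),
    tagToSymGo l acc = acc ++ pvAltList l := by
  induction l with
  | nil => intro acc; simp [tagToSymGo, pvAltList, PySem.Chars.find, PySem.Chars.find.go, pvRep]
  | cons c t ih =>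
      intro acc
      have hge : -1 ≤ PySem.Chars.find t ['>'] := PySem.Chars.neg_one_le_find t ['>']
      by_cases hgt : c = '>'
      · simp [tagToSymGo, hgt, pvAltList, find_cons_single, pvRep]
      · have step : pvAltList (c :: t) =
            (if c = '<' then "<s n=\"".toList else [c]) ++ pvAltList t := by
          unfold pvAltList
          rw [find_cons_single, if_neg hgt]
          by_cases hf : PySem.Chars.find t ['>'] = -1
          · simp [hf, pvRep, List.flatMap_cons]
          · have h1 : PySem.Chars.find t ['>'] + 1 ≠ -1 := by omega
            have h2 : (PySem.Chars.find t ['>'] + 1).toNat = (PySem.Chars.find t ['>']).toNat + 1 := by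
              omega
            simp [hf, h1, h2, pvRep, List.flatMap_cons, List.take_succ_cons]
        by_cases hlt : c = '<'
        · rw [step]; simp only [tagToSymGo, hlt, ih]
          simp
        · rw [step]; simp only [tagToSymGo, if_neg hlt, if_neg hgt, ih]
          simp

theorem toList_alt (s : String) : (tagToSym_alt s).toList = pvAltList s.toList := by
  unfold tagToSym_alt pvAltList
  by_cases hf : PySem.Chars.find s.toList ['>'] = -1
  · simp [hf, PySem.Str.find, PySem.Str.replace, replace_single]
  · have hpos : 0 ≤ PySem.Chars.find s.toList ['>'] := by
      have := PySem.Chars.neg_one_le_find s.toList ['>']; omega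
    simp only [PySem.Str.find]
    rw [if_neg (by simpa using hf), if_neg (by simpa using hf)]
    simp [PySem.Str.replace, PySem.Str.slice, replace_single, PySem.List.slice_to _ hpos]

-- ===== VERDICT (by name: the statement is the Claim_ definition above) =====
theorem tagToSym_spec : Claim_equal_tagToSym := by
  intro s _
  unfold Spec_tagToSym tagToSym
  rw [tagToSymGo_eq, ← toList_alt]
  exact String.ofList_toList
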